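-- pv_equiv track=rewrite | github.com/Pororo-Study/Programmers-High-Kit | PCCP-모의고사/1회/[PCCP 모의고사 1] 3번_차하린.py | bean
-- ===== SOURCE A (Python) =====
-- def bean(n, p):
--     if n == 1:
--         return "Rr"
--
--     parent = bean(n - 1, (p - 1) // 4 + 1)
--     if parent == "RR" or parent == "rr":
--         return parent
--
--     if p % 4 == 0:
--         return "rr"
--     elif p % 4 == 1:
--         return "RR"
--     else:
--         return "Rr"
-- ===== SOURCE B (Python) =====
-- def bean(n, p):
--     result = "Rr"
--     cur = p
--     for _ in range(n - 1):
--         r = cur % 4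
--         if r == 0:
--             result = "rr"
--         elif r == 1:
--             result = "RR"
--         cur = (cur - 1) // 4 + 1
--     return result
-- ===== Notes on version B (the rewrite author's own statement) =====
-- stated objective: simpler
-- what changed: Replaces the parent-first recursion with a single iterative upward walk over the ancestor chain, where nearer-root decisive nodes overwrite by assignment order instead of by recursion-return priority.
import Mathlib
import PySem

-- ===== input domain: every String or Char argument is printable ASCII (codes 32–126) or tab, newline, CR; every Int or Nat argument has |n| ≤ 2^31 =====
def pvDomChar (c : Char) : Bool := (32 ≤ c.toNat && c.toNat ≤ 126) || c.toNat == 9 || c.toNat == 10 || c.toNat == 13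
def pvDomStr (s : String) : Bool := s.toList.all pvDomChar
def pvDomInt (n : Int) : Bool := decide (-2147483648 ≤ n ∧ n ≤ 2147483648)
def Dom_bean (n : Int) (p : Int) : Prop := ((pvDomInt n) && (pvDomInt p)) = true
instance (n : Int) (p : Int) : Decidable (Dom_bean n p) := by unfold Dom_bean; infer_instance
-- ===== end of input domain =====

-- B replaces A's parent-first recursion with one iterative upward walk (simpler decomposition; return-value equivalence on n >= 1).
-- ===== PORT A =====
-- Fuel = n.toNat only guards termination of the transliterated recursion; for n >= 1 it never runs out.
def beanFuel : Nat → Int → Int → String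
  | 0, _, _ => "Rr"
  | fuel + 1, n, p =>
    if n = 1 then "Rr"
    else
      let parent := beanFuel fuel (n - 1) (PySem.Int.floordiv (p - 1) 4 + 1)
      if parent = "RR" ∨ parent = "rr" then parent
      else if PySem.Int.mod p 4 = 0 then "rr"
      else if PySem.Int.mod p 4 = 1 then "RR"
      else "Rr"

def bean (n : Int) (p : Int) : String := beanFuel n.toNat n p

-- ===== PORT B =====
def bean_alt (n : Int) (p : Int) : String :=
  ((PySem.List.pyRange 0 (n - 1) 1).foldl
    (fun (st : String × Int) (_ : Int) =>
      let r := PySem.Int.mod st.2 4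
      let result := if r = 0 then "rr" else if r = 1 then "RR" else st.1
      (result, PySem.Int.floordiv (st.2 - 1) 4 + 1))
    ("Rr", p)).1

-- ===== PRECONDITION & SPEC =====
-- Pre_bean excludes exactly the inputs n <= 0, on which A recurses until RecursionError and never returns.
def Pre_bean (n : Int) (p : Int) : Prop := 1 ≤ n
instance (n : Int) (p : Int) : Decidable (Pre_bean n p) := by unfold Pre_bean; infer_instance
def pvWitness_bean : Int × Int := (3, 7)

def Spec_bean (n : Int) (p : Int) (out : String) : Prop := out = bean_alt n p
instance (n : Int) (p : Int) (out : String) : Decidable (Spec_bean n p out) := by unfold Spec_bean; infer_instance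

-- ===== CLAIM (what is proved, stated in full; the proofs are below) =====
def Claim_equal_bean : Prop := ∀ (n : Int) (p : Int), Dom_bean n p → Pre_bean n p → Spec_bean n p (bean n p)

-- ===== LEMMAS AND PROOFS =====

-- the decision a single node makes, if any
def dec (p : Int) : Option String :=
  if PySem.Int.mod p 4 = 0 then some "rr"
  else if PySem.Int.mod p 4 = 1 then some "RR" else none

def par (p : Int) : Int := PySem.Int.floordiv (p - 1) 4 + 1

-- topmost decisive node among the k nodes p, par p, ... (nearer-root priority)
def gtop : Nat → Int → Option String
  | 0, _ => none
  | k + 1, p =>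
    match gtop k (par p) with
    | some x => some x
    | none => dec p

theorem dec_vals (p : Int) (x : String) (h : dec p = some x) : x = "rr" ∨ x = "RR" := by
  unfold dec at h
  split_ifs at h <;> simp_all

theorem gtop_vals (k : Nat) : ∀ (p : Int) (x : String), gtop k p = some x → x = "rr" ∨ x = "RR" := by
  induction k with
  | zero => intro p x h; simp [gtop] at h
  | succ k ih =>
    intro p x h
    unfold gtop at h
    cases hg : gtop k (par p) with
    | some y => rw [hg] at h; simp at h; subst h; exact ih _ _ hg
    | none => rw [hg] at h; exact dec_vals p x h

theorem beanFuel_eq (k : Nat) : ∀ (n p : Int), n.toNat = k + 1 → 1 ≤ n →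
    beanFuel (k + 1) n p = (gtop k p).getD "Rr" := by
  induction k with
  | zero =>
    intro n p hk _
    have hn : n = 1 := by omega
    simp [beanFuel, hn, gtop]
  | succ k ih =>
    intro n p hk _
    have hn : n ≠ 1 := by omega
    have hn1 : (n - 1).toNat = k + 1 := by omega
    have := ih (n - 1) (par p) hn1 (by omega)
    unfold beanFuel
    simp only [hn, if_false]
    rw [show (PySem.Int.floordiv (p - 1) 4 + 1) = par p from rfl, this]
    cases hg : gtop k (par p) with
    | some x =>
      rcases gtop_vals k (par p) x hg with h | h <;>
        simp [gtop, hg, h]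
    | none =>
      have : ¬ (("Rr" : String) = "RR" ∨ ("Rr" : String) = "rr") := by decide
      simp only [Option.getD, this, if_false]
      unfold gtop
      rw [hg]
      unfold dec
      split_ifs <;> simp_all

-- the loop of B, as pure Nat-recursion on the step count
def loopB : Nat → String → Int → String
  | 0, s, _ => s
  | k + 1, s, p => loopB k (if PySem.Int.mod p 4 = 0 then "rr" else if PySem.Int.mod p 4 = 1 then "RR" else s) (par p)

theorem loopB_eq (k : Nat) : ∀ (s : String) (p : Int), loopB k s p = (gtop k p).getD s := by
  induction k with
  | zero => intro s p; simp [loopB, gtop]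
  | succ k ih =>
    intro s p
    unfold loopB
    rw [ih]
    have hstep : gtop (k + 1) p = match gtop k (par p) with
      | some x => some x
      | none => dec p := rfl
    rw [hstep]
    cases hg : gtop k (par p) with
    | some x => simp
    | none => unfold dec; split_ifs <;> simp

theorem foldl_loopB (l : List Int) : ∀ (s : String) (p : Int),
    (l.foldl (fun (st : String × Int) (_ : Int) =>
      let r := PySem.Int.mod st.2 4
      let result := if r = 0 then "rr" else if r = 1 then "RR" else st.1
      (result, PySem.Int.floordiv (st.2 - 1) 4 + 1)) (s, p)).1 = loopB l.length s p := by
  induction l with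
  | nil => intro s p; simp [loopB]
  | cons a l ih => intro s p; simpa [loopB, par] using ih _ _

theorem bean_alt_eq (n p : Int) (hn : 1 ≤ n) : bean_alt n p = (gtop (n.toNat - 1) p).getD "Rr" := by
  unfold bean_alt
  rw [foldl_loopB, PySem.List.length_pyRange_one]
  rw [show (n - 1 - 0).toNat = n.toNat - 1 by omega]
  exact loopB_eq _ _ _

-- ===== VERDICT (by name: the statement is the Claim_ definition above) =====
theorem bean_spec : Claim_equal_bean := by
  intro n p _ hpre
  have h1 : 1 ≤ n := hpre
  unfold Spec_bean bean
  have hk : n.toNat = (n.toNat - 1) + 1 := by omega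
  rw [hk, beanFuel_eq (n.toNat - 1) n p hk h1, bean_alt_eq n p h1]
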